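-- pv_equiv track=rewrite | github.com/Chitrank-Dixit/coding-questions | microsoft/find_word_in_matrix.py | find_word_in_matrix
-- ===== SOURCE A (Python) =====
-- def find_word_in_matrix(matrix, word):
--     i = 0
--     j = 0
--     while i < len(matrix):
--         row_word = ""
--         col_word = ""
--         j = 0
--         while j < len(matrix):
--             row_word += matrix[i][j]
--             col_word += matrix[j][i]
--             j += 1
--         if row_word == word or col_word == word:
--             return True
--
--         i += 1
--     return False
-- ===== SOURCE B (Python) =====
-- def _matches(word, cells, n):
--     # greedy prefix scan: word equals the concatenation of cells[0..n) iff each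
--     # cell is found at the running position and the positions end exactly at len(word)
--     pos = 0
--     for k in range(n):
--         s = cells[k]
--         if not word.startswith(s, pos):
--             return False
--         pos += len(s)
--     return pos == len(word)
--
--
-- def find_word_in_matrix(matrix, word):
--     n = len(matrix)
--     if any(_matches(word, matrix[i], n) for i in range(n)):
--         return True
--     return any(_matches(word, [matrix[j][i] for j in range(n)], n) for i in range(n))
-- ===== Notes on version B (the rewrite author's own statement) =====
-- stated objective: faster
-- what changed: B never builds row/column strings: it checks whether word equals a row/column concatenation by a greedy startswith prefix scan advancing a position through word, exiting at the first mismatching cell, instead of A's interleaved string accumulation (repeated +=) and whole-string comparison.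
-- outside the precondition, e.g. on find_word_in_matrix([['x', 'q'], ['x']], 'xx'): A returns True, B raises IndexError
import Mathlib
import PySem

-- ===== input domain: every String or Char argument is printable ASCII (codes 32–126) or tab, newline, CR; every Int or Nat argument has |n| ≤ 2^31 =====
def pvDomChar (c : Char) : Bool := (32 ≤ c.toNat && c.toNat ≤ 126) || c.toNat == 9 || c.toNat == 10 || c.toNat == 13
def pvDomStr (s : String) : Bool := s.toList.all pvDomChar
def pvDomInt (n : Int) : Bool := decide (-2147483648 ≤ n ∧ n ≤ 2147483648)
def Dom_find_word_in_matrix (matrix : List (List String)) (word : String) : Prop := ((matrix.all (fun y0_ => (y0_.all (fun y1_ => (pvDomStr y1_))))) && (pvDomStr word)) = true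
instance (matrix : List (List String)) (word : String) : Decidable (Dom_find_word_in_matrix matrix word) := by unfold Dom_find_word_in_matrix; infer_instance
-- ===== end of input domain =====

-- B checks word against each row/column by a greedy startswith prefix scan (no string
-- building, early exit per mismatching cell) instead of A's string accumulation + comparison
-- (objective: alternative).

-- matrix[i][j]; the "" default is never reached under Pre_ (indices in range there)
def pvEntry (matrix : List (List String)) (i j : Nat) : String :=
  (PySem.List.pyGet? ((PySem.List.pyGet? matrix (i : Int)).getD []) (j : Int)).getD ""

-- cells[k]; the "" default is never reached under Pre_
def pvCell (cells : List String) (k : Nat) : String :=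
  (PySem.List.pyGet? cells (k : Int)).getD ""

-- ===== PORT A =====
-- inner while j loop: accumulates (row_word, col_word)
def findA_inner (matrix : List (List String)) (n i : Nat) : String × String :=
  (List.range n).foldl (fun p j => (p.1 ++ pvEntry matrix i j, p.2 ++ pvEntry matrix j i)) ("", "")

-- outer while i loop with early return
def findA_outer (matrix : List (List String)) (word : String) (n i : Nat) : Bool :=
  if i < n then
    let p := findA_inner matrix n i
    if p.1 == word || p.2 == word then true
    else findA_outer matrix word n (i + 1)
  else false
termination_by n - i

def find_word_in_matrix (matrix : List (List String)) (word : String) : Bool :=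
  findA_outer matrix word matrix.length 0

-- ===== PORT B =====
-- _matches(word, cells, n): pos starts at 0; word.startswith(cells[k], pos) is exact as
-- isPrefixOf on word.toList.drop pos (0 ≤ pos ≤ len(word) in every reachable state), and
-- len(s) is exact as s.toList.length (PySem.Str.len_eq)
def matchesB (word : String) (cells : List String) (n k pos : Nat) : Bool :=
  if k < n then
    -- s = cells[k], read inline (pure, same value)
    if PySem.Chars.startswith (word.toList.drop pos) (pvCell cells k).toList then
      matchesB word cells n (k + 1) (pos + (pvCell cells k).toList.length)
    else false
  else pos == word.toList.length
termination_by n - k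

def find_word_in_matrix_alt (matrix : List (List String)) (word : String) : Bool :=
  let n := matrix.length
  if (List.range n).any (fun i =>
      matchesB word ((PySem.List.pyGet? matrix (i : Int)).getD []) n 0 0) then true
  else (List.range n).any (fun i =>
      matchesB word ((List.range n).map (fun j => pvEntry matrix j i)) n 0 0)

-- ===== PRECONDITION & SPEC =====
-- Pre_ excludes ragged matrices (some row shorter than len(matrix)): there Python A raises
-- IndexError, or returns True from an early row/column match, while B's scan may reach the
-- missing cell of a short row and raise IndexError.
def Pre_find_word_in_matrix (matrix : List (List String)) (_word : String) : Prop :=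
  ∀ row ∈ matrix, matrix.length ≤ row.length
instance (matrix : List (List String)) (word : String) : Decidable (Pre_find_word_in_matrix matrix word) := by unfold Pre_find_word_in_matrix; infer_instance

def pvWitness_find_word_in_matrix : List (List String) × String := ([["a", "b"], ["c", "d"]], "bd")

def Spec_find_word_in_matrix (matrix : List (List String)) (word : String) (out : Bool) : Prop := out = find_word_in_matrix_alt matrix word
instance (matrix : List (List String)) (word : String) (out : Bool) : Decidable (Spec_find_word_in_matrix matrix word out) := by unfold Spec_find_word_in_matrix; infer_instance

-- ===== CLAIM (what is proved, stated in full; the proofs are below) =====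
def Claim_equal_find_word_in_matrix : Prop := ∀ (matrix : List (List String)) (word : String), Dom_find_word_in_matrix matrix word → Pre_find_word_in_matrix matrix word → Spec_find_word_in_matrix matrix word (find_word_in_matrix matrix word)

-- ===== LEMMAS AND PROOFS =====

-- a pair-valued foldl splits into two foldls
theorem foldl_pair_split (e1 e2 : Nat → String) (l : List Nat) (a b : String) :
    l.foldl (fun p j => (p.1 ++ e1 j, p.2 ++ e2 j)) (a, b)
      = (l.foldl (fun s j => s ++ e1 j) a, l.foldl (fun s j => s ++ e2 j) b) := by
  induction l generalizing a b with
  | nil => rfl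
  | cons x xs ih => simp [List.foldl, ih]

theorem any_or_split (p q : Nat → Bool) (l : List Nat) :
    l.any (fun t => p t || q t) = (l.any p || l.any q) := by
  induction l with
  | nil => rfl
  | cons x xs ih =>
    simp only [List.any_cons, ih]
    cases p x <;> cases q x <;> simp

-- A's early-returning outer loop is an `any` over the remaining indices
theorem outer_eq_any (matrix : List (List String)) (word : String) (n i : Nat) :
    findA_outer matrix word n i
      = (List.range' i (n - i)).any
          (fun t => ((List.range n).foldl (fun s j => s ++ pvEntry matrix t j) "") == word
                 || ((List.range n).foldl (fun s j => s ++ pvEntry matrix j t) "") == word) := by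
  induction h : n - i generalizing i with
  | zero =>
    rw [findA_outer]
    simp [Nat.not_lt.mpr (Nat.le_of_sub_eq_zero h)]
  | succ k ih =>
    have hi : i < n := by omega
    rw [findA_outer]
    rw [if_pos hi]
    have hp : findA_inner matrix n i
        = ((List.range n).foldl (fun s j => s ++ pvEntry matrix i j) "",
           (List.range n).foldl (fun s j => s ++ pvEntry matrix j i) "") := by
      unfold findA_inner
      exact foldl_pair_split _ _ _ "" ""
    rw [hp]
    simp only [List.range'_succ, List.any_cons]
    by_cases hm : ((((List.range n).foldl (fun s j => s ++ pvEntry matrix i j) "") == word)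
        || (((List.range n).foldl (fun s j => s ++ pvEntry matrix j i) "") == word)) = true
    · simp [hm]
    · simp only [Bool.not_eq_true] at hm
      simp [hm, ih (i + 1) (by omega)]

-- toList of a string-appending foldl is a flattened map
theorem foldl_append_toList (f : Nat → String) (l : List Nat) (a : String) :
    (l.foldl (fun s j => s ++ f j) a).toList
      = a.toList ++ (l.map (fun j => (f j).toList)).flatten := by
  induction l generalizing a with
  | nil => simp
  | cons x xs ih => simp [List.foldl, ih, String.toList_append]

-- the greedy prefix scan decides "word (from pos) = concatenation of cells[k..n)"
theorem matchesB_eq (word : String) (cells : List String) (n : Nat) :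
    ∀ k pos, pos ≤ word.toList.length →
    matchesB word cells n k pos
      = decide (word.toList.drop pos
          = ((List.range' k (n - k)).map (fun j => (pvCell cells j).toList)).flatten) := by
  intro k pos hpos
  induction h : n - k generalizing k pos with
  | zero =>
    rw [matchesB, if_neg (by omega)]
    simp only [List.range'_zero, List.map_nil, List.flatten_nil]
    rw [Bool.eq_iff_iff, beq_iff_eq, decide_eq_true_iff, List.drop_eq_nil_iff]
    omega
  | succ m ih =>
    have hk : k < n := by omega
    rw [matchesB, if_pos hk]
    rw [List.range'_succ, List.map_cons, List.flatten_cons]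
    by_cases hsw : PySem.Chars.startswith (word.toList.drop pos) (pvCell cells k).toList = true
    · rw [if_pos hsw]
      have hpre : (pvCell cells k).toList <+: word.toList.drop pos :=
        (PySem.Chars.startswith_iff _ _).mp hsw
      have hlen : (pvCell cells k).toList.length + pos ≤ word.toList.length := by
        have h1 := hpre.length_le
        rw [List.length_drop] at h1
        omega
      have hdecomp : word.toList.drop pos
          = (pvCell cells k).toList ++ word.toList.drop (pos + (pvCell cells k).toList.length) := by
        obtain ⟨t, ht⟩ := hpre
        rw [← ht]
        congr 1
        have : t = (word.toList.drop pos).drop (pvCell cells k).toList.length := by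
          rw [← ht, List.drop_left]
        rw [this, List.drop_drop]
      have hm1 : n - (k + 1) = m := by omega
      rw [ih (k + 1) (pos + (pvCell cells k).toList.length) (by omega) hm1, ← hm1]
      rw [Bool.eq_iff_iff, decide_eq_true_iff, decide_eq_true_iff]
      constructor
      · intro he
        rw [hdecomp, he]
      · intro he
        have := hdecomp.symm.trans he
        exact (List.append_cancel_left this)
    · rw [if_neg hsw]
      symm
      rw [decide_eq_false_iff_not]
      intro he
      exact hsw ((PySem.Chars.startswith_iff _ _).mpr ⟨_, he.symm⟩)

-- String equality against word, read on toList
theorem beq_word_eq_decide (x word : String) :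
    (x == word) = decide (word.toList = x.toList) := by
  rw [Bool.eq_iff_iff, beq_iff_eq, decide_eq_true_iff]
  constructor
  · intro he; rw [he]
  · intro he
    have : x.toList = word.toList := he.symm
    exact String.toList_injective this

theorem pvCell_map_range (n : Nat) (f : Nat → String) (j : Nat) (hj : j < n) :
    pvCell ((List.range n).map f) j = f j := by
  unfold pvCell
  rw [PySem.List.pyGet?_natCast]
  simp [hj]

-- per index i: A's accumulated string test = B's prefix scan, rows and columns
theorem row_case (matrix : List (List String)) (word : String) (i : Nat) :
    (((List.range matrix.length).foldl (fun s j => s ++ pvEntry matrix i j) "") == word)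
      = matchesB word ((PySem.List.pyGet? matrix (i : Int)).getD []) matrix.length 0 0 := by
  rw [matchesB_eq word _ matrix.length 0 0 (by omega)]
  rw [beq_word_eq_decide, foldl_append_toList]
  simp only [String.toList_empty, List.nil_append, List.drop_zero, Nat.sub_zero,
    ← List.range_eq_range']
  rfl

theorem col_case (matrix : List (List String)) (word : String) (i : Nat) :
    (((List.range matrix.length).foldl (fun s j => s ++ pvEntry matrix j i) "") == word)
      = matchesB word ((List.range matrix.length).map (fun j => pvEntry matrix j i))
          matrix.length 0 0 := by
  rw [matchesB_eq word _ matrix.length 0 0 (by omega)]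
  rw [beq_word_eq_decide, foldl_append_toList]
  simp only [String.toList_empty, List.nil_append, List.drop_zero, Nat.sub_zero,
    ← List.range_eq_range']
  have hmap : (List.range matrix.length).map (fun j => (pvEntry matrix j i).toList)
      = (List.range matrix.length).map
          (fun j => (pvCell ((List.range matrix.length).map (fun j => pvEntry matrix j i)) j).toList) := by
    apply List.map_congr_left
    intro j hj
    rw [pvCell_map_range _ _ _ (List.mem_range.mp hj)]
  rw [hmap]

-- ===== VERDICT (by name: the statement is the Claim_ definition above) =====
theorem find_word_in_matrix_spec : Claim_equal_find_word_in_matrix := by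
  intro matrix word _ _
  unfold Spec_find_word_in_matrix find_word_in_matrix find_word_in_matrix_alt
  rw [outer_eq_any, Nat.sub_zero, ← List.range_eq_range', any_or_split]
  simp only [row_case, col_case]
  cases h : (List.range matrix.length).any (fun i =>
      matchesB word ((PySem.List.pyGet? matrix (i : Int)).getD []) matrix.length 0 0) <;> simp [h]
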